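-- pv_equiv track=rewrite | github.com/aefskysa/adventofcode | 2021/code/day6.py | evolve_fish
-- ===== SOURCE A (Python) =====
-- def evolve_fish(fish_state, ndays, regen_idx=7):
--     for d in range(ndays + 1):
--         new_state = fish_state.copy()
--         new_fish = 0
--         regen_fish = 0
--         if d == 0:
--             continue
--         for idx, c in enumerate(fish_state):
--             new_state[idx-1] = c
--         new_state[regen_idx] += new_state[0]
--         new_state[-1] = new_state[0]
--         fish_state = new_state
--     return fish_state
-- ===== SOURCE B (Python) =====
-- def evolve_fish(fish_state, ndays, regen_idx=7):
--     if ndays <= 0: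
--         return list(fish_state)
--     n = len(fish_state)
--     r = regen_idx % n
--     # Circular buffer: the state is buf read starting at offset o, so a day's
--     # rotation is just o advancing; each day costs O(1) instead of a full copy.
--     buf = list(fish_state)
--     o = 0
--     for _ in range(ndays):
--         o = (o + 1) % n
--         buf[(o + r) % n] += buf[o]
--         buf[(o - 1) % n] = buf[o]
--     return buf[o:] + buf[:o]
-- ===== Notes on version B (the rewrite author's own statement) =====
-- stated objective: faster
-- what changed: B keeps the state in a fixed circular buffer read from a moving offset, so each day is an O(1) offset advance plus two in-place updates instead of A's O(n) copy-and-shift of the whole list; Pre_ only excludes the inputs where A raises IndexError (ndays >= 1 with an empty list or regen_idx outside [-n, n-1]).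
import Mathlib
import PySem

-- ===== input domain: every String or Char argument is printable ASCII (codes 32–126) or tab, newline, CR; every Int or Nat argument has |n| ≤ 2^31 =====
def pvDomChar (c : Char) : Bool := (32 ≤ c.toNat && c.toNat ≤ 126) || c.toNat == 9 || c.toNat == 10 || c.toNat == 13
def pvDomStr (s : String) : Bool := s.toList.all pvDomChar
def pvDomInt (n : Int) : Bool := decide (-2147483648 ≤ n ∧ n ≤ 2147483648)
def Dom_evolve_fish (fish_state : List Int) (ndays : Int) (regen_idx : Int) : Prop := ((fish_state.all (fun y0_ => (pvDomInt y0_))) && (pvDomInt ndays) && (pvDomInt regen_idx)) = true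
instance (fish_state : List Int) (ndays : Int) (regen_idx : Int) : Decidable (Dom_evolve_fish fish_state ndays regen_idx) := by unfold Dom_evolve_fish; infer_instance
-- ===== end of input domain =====

-- B keeps the state in a fixed circular buffer read from a moving offset, so a day is an
-- offset advance plus two O(1) in-place updates instead of A's O(n) copy-and-shift; A = B is
-- proved on every input where the Python A returns normally (Pre_). Return values only.

-- ===== PORT A =====
-- One iteration of A's day loop (the body after the 'continue'); Option-threaded: 'none'
-- exactly where Python raises IndexError (empty list / regen_idx out of range).
def evolveBodyA (regen_idx : Int) (fs : List Int) : Option (List Int) :=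
  -- new_state = fish_state.copy(); for idx, c in enumerate(fish_state): new_state[idx-1] = c
  let ns := (PySem.List.enumerate fs 0).foldl (fun ns q => PySem.List.pySetD ns (q.1 - 1) q.2) fs
  -- new_state[regen_idx] += new_state[0]   (each read may raise IndexError)
  (PySem.List.pyGet? ns regen_idx).bind fun a =>
    (PySem.List.pyGet? ns 0).bind fun b =>
      let ns2 := PySem.List.pySetD ns regen_idx (a + b)
      -- new_state[-1] = new_state[0]
      (PySem.List.pyGet? ns2 0).bind fun h =>
        some (PySem.List.pySetD ns2 (-1) h)

def evolve_fish (fish_state : List Int) (ndays : Int) (regen_idx : Int) : List Int :=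
  ((PySem.List.pyRange 0 (ndays + 1) 1).foldl
      (fun st d => st.bind (fun fs => if d = 0 then some fs else evolveBodyA regen_idx fs))
      (some fish_state)).getD []

-- ===== PORT B =====
-- B's day loop: the state is buf read starting at offset o; a day advances o (the rotation)
-- and performs the two in-place updates; at the end the answer is buf[o:] + buf[:o].
def dayLoopB (n r : Nat) : Nat → List Int → Nat → List Int
  | 0, buf, o => buf.drop o ++ buf.take o
  | d + 1, buf, o =>
      let o' := (o + 1) % n
      -- buf[(o + r) % n] += buf[o]
      let buf1 := buf.set ((o' + r) % n) (buf.getD ((o' + r) % n) 0 + buf.getD o' 0)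
      -- buf[(o - 1) % n] = buf[o]   (Python's % of the possibly negative o - 1)
      let buf2 := buf1.set (PySem.Int.mod ((o' : Int) - 1) (n : Int)).toNat (buf1.getD o' 0)
      dayLoopB n r d buf2 o'

def evolve_fish_alt (fish_state : List Int) (ndays : Int) (regen_idx : Int) : List Int :=
  if ndays ≤ 0 then fish_state
  else
    let n := fish_state.length
    -- r = regen_idx % n is a nonnegative Python int, kept as a Nat index
    let r : Nat := (PySem.Int.mod regen_idx n).toNat
    dayLoopB n r ndays.toNat fish_state 0

-- ===== PRECONDITION & SPEC =====
-- Pre_ excludes exactly the inputs where the Python A raises IndexError: ndays >= 1 with an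
-- empty list or with regen_idx outside [-n, n-1].
def Pre_evolve_fish (fish_state : List Int) (ndays : Int) (regen_idx : Int) : Prop :=
  ndays ≤ 0 ∨ (fish_state ≠ [] ∧ -(fish_state.length : Int) ≤ regen_idx ∧ regen_idx < (fish_state.length : Int))
instance (fish_state : List Int) (ndays : Int) (regen_idx : Int) : Decidable (Pre_evolve_fish fish_state ndays regen_idx) := by unfold Pre_evolve_fish; infer_instance

def pvWitness_evolve_fish : List Int × Int × Int := ([3, 4, 3, 1, 2], 4, 1)

def Spec_evolve_fish (fish_state : List Int) (ndays : Int) (regen_idx : Int) (out : List Int) : Prop := out = evolve_fish_alt fish_state ndays regen_idx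
instance (fish_state : List Int) (ndays : Int) (regen_idx : Int) (out : List Int) : Decidable (Spec_evolve_fish fish_state ndays regen_idx out) := by unfold Spec_evolve_fish; infer_instance

-- ===== CLAIM (what is proved, stated in full; the proofs are below) =====
def Claim_equal_evolve_fish : Prop := ∀ (fish_state : List Int) (ndays : Int) (regen_idx : Int), Dom_evolve_fish fish_state ndays regen_idx → Pre_evolve_fish fish_state ndays regen_idx → Spec_evolve_fish fish_state ndays regen_idx (evolve_fish fish_state ndays regen_idx)

-- ===== LEMMAS AND PROOFS =====

-- The abstract one-day step both ports compute.
def fstep (r : Int) (s : List Int) : List Int :=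
  (List.range s.length).map (fun i =>
    if i = s.length - 1 then
      s.getD (1 % s.length) 0 + (if r = 0 then s.getD (1 % s.length) 0 else 0)
    else
      s.getD (i + 1) 0 + (if (i : Int) = r then s.getD (1 % s.length) 0 else 0))

theorem fstep_length (r : Int) (s : List Int) : (fstep r s).length = s.length := by
  simp [fstep]

theorem pySetD_neg_one (xs : List Int) (v : Int) (h : xs ≠ []) :
    PySem.List.pySetD xs (-1) v = xs.set (xs.length - 1) v := by
  rcases xs with _ | ⟨a, t⟩
  · exact absurd rfl h
  · simp [PySem.List.pySetD, PySem.List.pySet?, PySem.List.pyIdx?]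

theorem pySetD_inrange (xs : List Int) (i : Int) (v : Int)
    (h1 : -(xs.length : Int) ≤ i) (h2 : i < xs.length) :
    PySem.List.pySetD xs i v = xs.set (PySem.Int.mod i xs.length).toNat v := by
  have hn : 0 < (xs.length : Int) := by omega
  rw [PySem.Int.mod_eq_emod_of_pos hn]
  simp only [PySem.List.pySetD, PySem.List.pySet?, PySem.List.pyIdx?]
  rcases le_or_gt 0 i with hi | hi
  · rw [if_pos hi, if_pos h2]
    simp only [Option.map_some, Option.getD_some]
    rw [Int.emod_eq_of_lt hi h2]
  · rw [if_neg (by omega), if_pos h1]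
    simp only [Option.map_some, Option.getD_some]
    have hmod : i % (xs.length : Int) = i + xs.length := by
      conv_lhs => rw [show i = (i + (xs.length : Int)) + (xs.length : Int) * (-1) by ring]
      rw [Int.add_mul_emod_self_left, Int.emod_eq_of_lt (by omega) (by omega)]
    rw [hmod, show (i + (xs.length : Int)).toNat = xs.length - (-i).toNat from by omega]

theorem pyGet?_inrange (xs : List Int) (i : Int)
    (h1 : -(xs.length : Int) ≤ i) (h2 : i < xs.length) :
    PySem.List.pyGet? xs i = xs[(PySem.Int.mod i xs.length).toNat]? := by
  have hn : 0 < (xs.length : Int) := by omega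
  rw [PySem.Int.mod_eq_emod_of_pos hn]
  simp only [PySem.List.pyGet?, PySem.List.pyIdx?]
  rcases le_or_gt 0 i with hi | hi
  · rw [if_pos hi, if_pos h2]
    simp only [Option.bind_some]
    rw [Int.emod_eq_of_lt hi h2]
  · rw [if_neg (by omega), if_pos h1]
    simp only [Option.bind_some]
    have hmod : i % (xs.length : Int) = i + xs.length := by
      conv_lhs => rw [show i = (i + (xs.length : Int)) + (xs.length : Int) * (-1) by ring]
      rw [Int.add_mul_emod_self_left, Int.emod_eq_of_lt (by omega) (by omega)]
    rw [hmod, show (i + (xs.length : Int)).toNat = xs.length - (-i).toNat from by omega]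

theorem pyGet?_inrange' (xs : List Int) (i : Int) (k : Nat)
    (h1 : -(xs.length : Int) ≤ i) (h2 : i < xs.length)
    (hk : (PySem.Int.mod i (xs.length : Int)).toNat = k) :
    PySem.List.pyGet? xs i = xs[k]? := by
  rw [pyGet?_inrange xs i h1 h2, hk]

theorem pySetD_inrange' (xs : List Int) (i : Int) (v : Int) (k : Nat)
    (h1 : -(xs.length : Int) ≤ i) (h2 : i < xs.length)
    (hk : (PySem.Int.mod i (xs.length : Int)).toNat = k) :
    PySem.List.pySetD xs i v = xs.set k v := by
  rw [pySetD_inrange xs i v h1 h2, hk]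

theorem setRun : ∀ (l : List Int) (acc : List Int) (p : Nat),
    p + l.length ≤ acc.length →
    (PySem.List.enumerate l ((p : Int) + 1)).foldl
        (fun ns q => PySem.List.pySetD ns (q.1 - 1) q.2) acc
      = acc.take p ++ l ++ acc.drop (p + l.length) := by
  intro l
  induction l with
  | nil =>
      intro acc p h
      simp [PySem.List.enumerate]
  | cons x xs ih =>
      intro acc p h
      simp only [List.length_cons] at h
      rw [PySem.List.enumerate_cons, List.foldl_cons]
      have hp : p < acc.length := by omega
      have hstep : PySem.List.pySetD acc (((p : Int) + 1) - 1) x = acc.set p x := by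
        rw [show ((p : Int) + 1) - 1 = ((p : Nat) : Int) by ring]
        simp
      rw [hstep]
      rw [show ((p : Int) + 1) + 1 = (((p + 1 : Nat)) : Int) + 1 by push_cast; ring]
      rw [ih (acc.set p x) (p + 1) (by simp; omega)]
      have hlen : (acc.take p).length = p := by rw [List.length_take]; omega
      have h1 : (acc.set p x).take (p + 1) = acc.take p ++ [x] := by
        rw [List.take_set, List.take_add_one, List.set_append,
          if_neg (by rw [hlen]; omega), hlen, Nat.sub_self, List.getElem?_eq_getElem hp]
        rfl
      have h2 : (acc.set p x).drop (p + 1 + xs.length) = acc.drop (p + (xs.length + 1)) := by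
        rw [List.drop_set, if_pos (by omega)]
        congr 1
        omega
      rw [h1, h2]
      simp

theorem rotFold (x : Int) (t : List Int) :
    (PySem.List.enumerate (x :: t) 0).foldl
        (fun ns q => PySem.List.pySetD ns (q.1 - 1) q.2) (x :: t)
      = t ++ [x] := by
  rw [PySem.List.enumerate_cons, List.foldl_cons]
  have hfirst : PySem.List.pySetD (x :: t) ((0 : Int) - 1) x = (x :: t).set t.length x := by
    rw [show (0 : Int) - 1 = -1 by ring, pySetD_neg_one _ _ (by simp)]
    simp
  rw [hfirst]
  rw [show (0 : Int) + 1 = ((0 : Nat) : Int) + 1 by simp]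
  rw [setRun t _ 0 (by simp)]
  simp only [List.take_zero, List.nil_append, Nat.zero_add]
  congr 1
  apply List.ext_getElem
  · simp
  · intro i h1 h2
    have hi : i = 0 := by simp at h1; omega
    subst hi
    rw [List.getElem_drop]
    rw [List.getElem_set]
    simp

theorem head_rot (x : Int) (t : List Int) :
    (t ++ [x]).getD 0 0 = (x :: t).getD (1 % (x :: t).length) 0 := by
  cases t with
  | nil => simp
  | cons a t' =>
      have h : 1 % (x :: a :: t').length = 1 := Nat.mod_eq_of_lt (by simp)
      rw [h]
      simp

theorem evolveBodyA_eq (x : Int) (t : List Int) (ri : Int)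
    (h1 : -(((x :: t).length : Int)) ≤ ri) (h2 : ri < ((x :: t).length : Int)) :
    evolveBodyA ri (x :: t)
      = some (fstep (PySem.Int.mod ri ((x :: t).length : Int)) (x :: t)) := by
  have hxt : ((x :: t).length : Int) = ((t.length + 1 : Nat) : Int) := by simp
  rw [hxt] at h1 h2 ⊢
  set n : Nat := t.length + 1 with hndef
  have hnpos : 0 < n := by omega
  set r := PySem.Int.mod ri (n : Int) with hrdef
  have hr0 : 0 ≤ r := PySem.Int.mod_nonneg _ (by exact_mod_cast hnpos)
  have hrn : r < (n : Int) := PySem.Int.mod_lt _ (by exact_mod_cast hnpos)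
  have hrA : r.toNat < n := by omega
  have hlen : (t ++ [x]).length = n := by
    simp only [List.length_append, List.length_cons, List.length_nil]
    omega
  dsimp only [evolveBodyA]
  rw [rotFold]
  have hk : (PySem.Int.mod ri ((t ++ [x]).length : Int)).toNat = r.toNat := by rw [hlen]
  have hb1 : -(((t ++ [x]).length : Int)) ≤ ri := by rw [hlen]; omega
  have hb2 : ri < (((t ++ [x]).length : Int)) := by rw [hlen]; omega
  have hget1 : PySem.List.pyGet? (t ++ [x]) ri = some ((t ++ [x]).getD r.toNat 0) := by
    rw [pyGet?_inrange' (t ++ [x]) ri r.toNat hb1 hb2 hk,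
      List.getElem?_eq_getElem (by omega), List.getD_eq_getElem _ _ (by omega)]
  have hget2 : PySem.List.pyGet? (t ++ [x]) 0 = some ((t ++ [x]).getD 0 0) := by
    rw [PySem.List.pyGet?_zero, List.getElem?_eq_getElem (by omega)]
    congr 1
    exact (List.getD_eq_getElem _ _ (by omega)).symm
  rw [hget1, hget2]
  simp only [Option.bind_some]
  rw [pySetD_inrange' (t ++ [x]) ri _ r.toNat hb1 hb2 hk]
  set w : Int := (t ++ [x]).getD r.toNat 0 + (t ++ [x]).getD 0 0 with hwdef
  set ns2 := (t ++ [x]).set r.toNat w with hns2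
  have hlen2 : ns2.length = n := by
    rw [hns2]
    simp only [List.length_set, List.length_append, List.length_cons, List.length_nil]
    omega
  have hne2 : ns2 ≠ [] := by
    intro hh
    have hz := hlen2
    rw [hh] at hz
    simp only [List.length_nil] at hz
    omega
  have hget3 : PySem.List.pyGet? ns2 0 = some (ns2.getD 0 0) := by
    have hgd : ns2.getD 0 0 = ns2[0]'(by omega) := List.getD_eq_getElem _ _ (by omega)
    rw [PySem.List.pyGet?_zero, hgd, List.getElem?_eq_getElem (by omega)]
  rw [hget3]
  simp only [Option.bind_some]
  rw [pySetD_neg_one _ _ hne2, hlen2]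
  congr 1
  have hfl : (fstep r (x :: t)).length = n := by
    rw [fstep_length]
    simp only [List.length_cons]
    omega
  apply List.ext_getElem
  · rw [hfl]; simp [hlen2]
  · intro i hL hR
    have hi : i < n := by rw [hfl] at hR; exact hR
    have hns2i : i < ns2.length := by omega
    have hfs : fstep r (x :: t) = (List.range n).map (fun i =>
        if i = n - 1 then
          (x :: t).getD (1 % n) 0 + (if r = 0 then (x :: t).getD (1 % n) 0 else 0)
        else
          (x :: t).getD (i + 1) 0 + (if (i : Int) = r then (x :: t).getD (1 % n) 0 else 0)) := by
      rw [fstep]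
      simp [hndef]
    simp only [hfs, List.getElem_map, List.getElem_range]
    have hrot : ∀ (j : Nat), j < n →
        (t ++ [x]).getD j 0 = if j = n - 1 then x else (x :: t).getD (j + 1) 0 := by
      intro j hj
      by_cases hjl : j = n - 1
      · rw [if_pos hjl, List.getD_eq_getElem _ _ (by simp; omega)]
        rw [List.getElem_append_right (by omega)]
        simp [hjl]
      · rw [if_neg hjl, List.getD_eq_getElem _ _ (by simp; omega),
          List.getD_eq_getElem _ _ (by simp; omega)]
        rw [List.getElem_append_left (by omega)]
        simp
    have hhead : (t ++ [x]).getD 0 0 = (x :: t).getD (1 % n) 0 := by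
      have h := head_rot x t
      rw [show (x :: t).length = n by simp [hndef]] at h
      exact h
    have hns2get : ∀ (j : Nat) (hj : j < ns2.length),
        ns2[j] = if r.toNat = j then w else (t ++ [x]).getD j 0 := by
      intro j hj
      simp only [hns2, List.getElem_set]
      split
      · rfl
      · rw [List.getD_eq_getElem _ _ (by rw [hlen2] at hj; simp [hndef]; omega)]
    have hv : ns2.getD 0 0 = if r.toNat = 0 then w else (t ++ [x]).getD 0 0 := by
      rw [List.getD_eq_getElem _ _ (by omega), hns2get 0 (by omega)]
    rw [List.getElem_set]
    by_cases hil : i = n - 1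
    · rw [if_pos (by omega), if_pos hil, hv]
      by_cases hra0 : r.toNat = 0
      · rw [if_pos hra0, if_pos (show r = 0 by omega), hwdef, hra0, hhead]
      · rw [if_neg hra0, if_neg (show ¬ r = 0 by omega), hhead]
        ring
    · rw [if_neg (by omega), if_neg hil, hns2get i hns2i]
      by_cases hir : r.toNat = i
      · rw [if_pos hir, if_pos (show (i : Int) = r by omega), hwdef, hir, hhead,
          hrot i (by omega), if_neg hil]
      · rw [if_neg hir, if_neg (show ¬ (i : Int) = r by omega),
          hrot i (by omega), if_neg hil]
        ring

theorem loopA (ri : Int) (n0 : Nat) (hn : 0 < n0)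
    (h1 : -(n0 : Int) ≤ ri) (h2 : ri < (n0 : Int)) :
    ∀ (l : List Int) (s : List Int), s.length = n0 → (∀ d ∈ l, d ≠ 0) →
    l.foldl (fun st d => st.bind (fun fs => if d = 0 then some fs else evolveBodyA ri fs)) (some s)
      = some ((fstep (PySem.Int.mod ri (n0 : Int)))^[l.length] s) := by
  intro l
  induction l with
  | nil => intro s hs _; simp
  | cons d l ih =>
      intro s hs hd
      rw [List.foldl_cons]
      simp only [Option.bind_some]
      rw [if_neg (hd d (List.mem_cons_self ..))]
      obtain ⟨x, t, rfl⟩ : ∃ x t, s = x :: t := by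
        cases s with
        | nil => simp at hs; omega
        | cons a b => exact ⟨a, b, rfl⟩
      rw [evolveBodyA_eq x t ri (by rw [hs]; omega) (by rw [hs]; omega)]
      rw [show (((x :: t).length : Nat) : Int) = (n0 : Int) by rw [hs]]
      rw [ih _ (by rw [fstep_length, hs]) (fun e he => hd e (List.mem_cons_of_mem _ he))]
      rw [List.length_cons, Function.iterate_succ_apply]

-- ===== B-side lemmas =====

theorem mod_two_window (a n : Nat) (hn : 0 < n) (h : a < 2 * n) :
    a % n = if a < n then a else a - n := by
  split
  · exact Nat.mod_eq_of_lt (by omega)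
  · rw [Nat.mod_eq_sub_mod (by omega), Nat.mod_eq_of_lt (by omega)]

theorem getD_set_int (xs : List Int) (j i : Nat) (v : Int) (hj : j < xs.length) :
    (xs.set j v).getD i 0 = if j = i then v else xs.getD i 0 := by
  by_cases hi : i < xs.length
  · rw [List.getD_eq_getElem _ _ (by simpa using hi), List.getElem_set]
    split
    · rfl
    · exact (List.getD_eq_getElem _ _ hi).symm
  · rw [if_neg (by omega)]
    rw [List.getD_eq_getElem?_getD, List.getD_eq_getElem?_getD,
      List.getElem?_eq_none (by simpa using hi), List.getElem?_eq_none (by omega)]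

theorem view_getD (buf : List Int) (o i : Nat) (ho : o < buf.length) (hi : i < buf.length) :
    (buf.drop o ++ buf.take o).getD i 0 = buf.getD ((o + i) % buf.length) 0 := by
  set n := buf.length with hn
  have hdl : (buf.drop o).length = n - o := by simp [hn]
  have htl : (buf.take o).length = o := by simp [hn]; omega
  rw [mod_two_window (o + i) n (by omega) (by omega)]
  by_cases h : o + i < n
  · rw [if_pos h, List.getD_eq_getElem _ _ (by simp [hn]; omega),
      List.getElem_append_left (by omega), List.getElem_drop,
      List.getD_eq_getElem _ _ (by omega)]
  · rw [if_neg h, List.getD_eq_getElem _ _ (by simp [hn]; omega),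
      List.getElem_append_right (by omega),
      List.getD_eq_getElem _ _ (by omega), List.getElem_take]
    simp only [hdl]
    congr 1
    omega

theorem mod_pred (o' n : Nat) (hn : 0 < n) (ho : o' < n) :
    (PySem.Int.mod ((o' : Int) - 1) (n : Int)).toNat = (o' + (n - 1)) % n := by
  by_cases h0 : o' = 0
  · subst h0
    have h1 : PySem.Int.mod ((0 : Int) - 1) (n : Int) = (n : Int) - 1 := by
      rw [PySem.Int.mod_eq_emod_of_pos (by exact_mod_cast hn)]
      conv_lhs => rw [show (0 : Int) - 1 = ((n : Int) - 1) + (n : Int) * (-1) by ring]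
      rw [Int.add_mul_emod_self_left, Int.emod_eq_of_lt (by omega) (by omega)]
    rw [show (((0 : Nat) : Int) - 1) = ((0 : Int) - 1) by norm_num, h1,
      Nat.mod_eq_of_lt (by omega)]
    omega
  · have h1 : PySem.Int.mod ((o' : Int) - 1) (n : Int) = (o' : Int) - 1 := by
      rw [PySem.Int.mod_eq_emod_of_pos (by exact_mod_cast hn)]
      exact Int.emod_eq_of_lt (by omega) (by omega)
    rw [h1, mod_two_window _ n hn (by omega), if_neg (by omega)]
    omega

theorem mod_shift_inj (n o' x y : Nat) (hn : 0 < n) (ho : o' < n)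
    (hx : x < n) (hy : y < n) (h : (o' + x) % n = (o' + y) % n) : x = y := by
  rw [mod_two_window _ n hn (by omega), mod_two_window _ n hn (by omega)] at h
  split_ifs at h <;> omega

theorem stepB_view (buf : List Int) (o r : Nat)
    (ho : o < buf.length) (hr : r < buf.length) :
    ((buf.set (((o + 1) % buf.length + r) % buf.length)
        (buf.getD (((o + 1) % buf.length + r) % buf.length) 0 + buf.getD ((o + 1) % buf.length) 0)).set
          (PySem.Int.mod (((((o + 1) % buf.length) : Nat) : Int) - 1) ((buf.length : Nat) : Int)).toNat
          ((buf.set (((o + 1) % buf.length + r) % buf.length)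
            (buf.getD (((o + 1) % buf.length + r) % buf.length) 0 + buf.getD ((o + 1) % buf.length) 0)).getD
              ((o + 1) % buf.length) 0)).drop ((o + 1) % buf.length)
      ++ ((buf.set (((o + 1) % buf.length + r) % buf.length)
        (buf.getD (((o + 1) % buf.length + r) % buf.length) 0 + buf.getD ((o + 1) % buf.length) 0)).set
          (PySem.Int.mod (((((o + 1) % buf.length) : Nat) : Int) - 1) ((buf.length : Nat) : Int)).toNat
          ((buf.set (((o + 1) % buf.length + r) % buf.length)
            (buf.getD (((o + 1) % buf.length + r) % buf.length) 0 + buf.getD ((o + 1) % buf.length) 0)).getD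
              ((o + 1) % buf.length) 0)).take ((o + 1) % buf.length)
      = fstep (r : Int) (buf.drop o ++ buf.take o) := by
  set n := buf.length with hn
  have hnpos : 0 < n := by omega
  set o' := (o + 1) % n with ho'
  have ho'n : o' < n := Nat.mod_lt _ hnpos
  set a := (o' + r) % n with ha
  have han : a < n := Nat.mod_lt _ hnpos
  set buf1 := buf.set a (buf.getD a 0 + buf.getD o' 0) with hbuf1
  have hl1 : buf1.length = n := by simp [hbuf1, hn]
  have hb : (PySem.Int.mod (((o' : Nat) : Int) - 1) ((n : Nat) : Int)).toNat = (o' + (n - 1)) % n :=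
    mod_pred o' n hnpos ho'n
  set b := (o' + (n - 1)) % n with hbdef
  have hbn : b < n := Nat.mod_lt _ hnpos
  set buf2 := buf1.set (PySem.Int.mod ((o' : Int) - 1) ((n : Nat) : Int)).toNat (buf1.getD o' 0) with hbuf2
  have hbuf2' : buf2 = buf1.set b (buf1.getD o' 0) := by rw [hbuf2, hb]
  have hl2 : buf2.length = n := by simp [hbuf2, hl1]
  -- value written at o' / read as buf1.getD o'
  have hao' : (a = o') ↔ (r = 0) := by
    constructor
    · intro h
      have : (o' + r) % n = (o' + 0) % n := by
        rw [Nat.add_zero, Nat.mod_eq_of_lt ho'n]; exact h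
      exact mod_shift_inj n o' r 0 hnpos ho'n hr hnpos this
    · intro h; rw [ha, h, Nat.add_zero, Nat.mod_eq_of_lt ho'n]
  have hbuf1o' : buf1.getD o' 0 = buf.getD o' 0 + (if r = 0 then buf.getD o' 0 else 0) := by
    rw [hbuf1, getD_set_int _ _ _ _ (by omega)]
    by_cases hr0 : r = 0
    · rw [if_pos (hao'.mpr hr0), if_pos hr0, hao'.mpr hr0]
    · rw [if_neg (fun hh => hr0 (hao'.mp hh)), if_neg hr0, add_zero]
  -- t facts
  have ht_get : ∀ j, j < n → (buf.drop o ++ buf.take o).getD j 0 = buf.getD ((o + j) % n) 0 :=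
    fun j hj => view_getD buf o j (by omega) (by omega)
  have htlen : (buf.drop o ++ buf.take o).length = n := by simp [hn]; omega
  have hone : 1 % n < n := Nat.mod_lt _ hnpos
  have ht1 : (buf.drop o ++ buf.take o).getD (1 % n) 0 = buf.getD o' 0 := by
    rw [ht_get _ hone]
    congr 1
    rw [ho', Nat.add_mod o 1 n, Nat.mod_eq_of_lt (show o < n by omega)]
  apply List.ext_getElem
  · rw [fstep_length, htlen]
    simp [hl2]
    omega
  · intro i hL hR
    have hi : i < n := by rw [fstep_length, htlen] at hR; exact hR
    have hview : ∀ (j : Nat) (hj : j < n), (buf2.drop o' ++ buf2.take o')[j]'(by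
        rw [List.length_append, List.length_drop, List.length_take, hl2,
          Nat.min_eq_left (le_of_lt ho'n), Nat.sub_add_cancel (le_of_lt ho'n)]; exact hj) = buf2.getD ((o' + j) % n) 0 := by
      intro j hj
      rw [← List.getD_eq_getElem _ 0 (by rw [List.length_append, List.length_drop, List.length_take, hl2,
        Nat.min_eq_left (le_of_lt ho'n), Nat.sub_add_cancel (le_of_lt ho'n)]; exact hj)]
      have := view_getD buf2 o' j (by omega) (by omega)
      rw [hl2] at this
      exact this
    rw [hview i hi]
    have hfs : fstep (r : Int) (buf.drop o ++ buf.take o) = (List.range n).map (fun i =>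
        if i = n - 1 then
          (buf.drop o ++ buf.take o).getD (1 % n) 0 + (if (r : Int) = 0 then (buf.drop o ++ buf.take o).getD (1 % n) 0 else 0)
        else
          (buf.drop o ++ buf.take o).getD (i + 1) 0 + (if (i : Int) = (r : Int) then (buf.drop o ++ buf.take o).getD (1 % n) 0 else 0)) := by
      rw [fstep, htlen]
    simp only [hfs, List.getElem_map, List.getElem_range]
    rw [hbuf2']
    by_cases hil : i = n - 1
    · -- position b
      have : (o' + i) % n = b := by rw [hbdef, hil]
      rw [this, getD_set_int _ _ _ _ (by omega), if_pos rfl, if_pos hil, hbuf1o', ht1]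
      by_cases hr0 : r = 0
      · rw [if_pos hr0, if_pos (by exact_mod_cast congrArg (Nat.cast : Nat → Int) hr0)]
      · rw [if_neg hr0, if_neg (by exact_mod_cast fun hh => hr0 (by exact_mod_cast hh))]
    · -- position (o'+i)%n ≠ b
      have hne_b : (o' + i) % n ≠ b := by
        intro hh
        exact hil (mod_shift_inj n o' i (n - 1) hnpos ho'n hi (by omega) hh)
      rw [getD_set_int _ _ _ _ (by omega), if_neg (fun hh => hne_b hh.symm)]
      rw [if_neg hil]
      have hsucc : (o' + i) % n = (o + (i + 1)) % n := by
        rw [ho']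
        conv_lhs => rw [show (o + 1) % n + i = (o + 1) % n + i % n from by rw [Nat.mod_eq_of_lt hi]]
        rw [← Nat.add_mod]
        congr 1
        omega
      rw [hbuf1, getD_set_int _ _ _ _ (by omega)]
      by_cases hir : a = (o' + i) % n
      · have hri : r = i := mod_shift_inj n o' r i hnpos ho'n hr hi (by rw [← ha, hir])
        have hii : (i : Int) = (r : Int) := by exact_mod_cast hri.symm
        rw [if_pos hir, if_pos hii, ht1, ht_get (i + 1) (by omega), ← hsucc, hir]
      · have hri : ¬ ((i : Int) = (r : Int)) := by
          intro hh
          have hri' : r = i := by exact_mod_cast hh.symm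
          exact hir (by rw [ha, hri'])
        rw [if_neg hir, if_neg hri, add_zero, ht_get (i + 1) (by omega), ← hsucc]

theorem loopB_view (n r : Nat) (hn : 0 < n) (hr : r < n) :
    ∀ (d : Nat) (buf : List Int) (o : Nat), buf.length = n → o < n →
      dayLoopB n r d buf o = (fstep (r : Int))^[d] (buf.drop o ++ buf.take o) := by
  intro d
  induction d with
  | zero => intro buf o _ _; rfl
  | succ d ih =>
      intro buf o hlen ho
      unfold dayLoopB
      have hstep := stepB_view buf o r (by omega) (by omega)
      rw [hlen] at hstep
      have hl2 : ((buf.set (((o + 1) % n + r) % n)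
          (buf.getD (((o + 1) % n + r) % n) 0 + buf.getD ((o + 1) % n) 0)).set
            (PySem.Int.mod ((((o + 1) % n : Nat) : Int) - 1) ((n : Nat) : Int)).toNat
            ((buf.set (((o + 1) % n + r) % n)
              (buf.getD (((o + 1) % n + r) % n) 0 + buf.getD ((o + 1) % n) 0)).getD ((o + 1) % n) 0)).length = n := by
        simp [hlen]
      rw [ih _ _ hl2 (Nat.mod_lt _ hn), hstep, ← Function.iterate_succ_apply]

-- ===== VERDICT =====
theorem evolve_fish_spec : Claim_equal_evolve_fish := by
  unfold Claim_equal_evolve_fish Spec_evolve_fish Pre_evolve_fish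
  intro fs nd ri _ hpre
  unfold evolve_fish evolve_fish_alt
  by_cases hnd : nd ≤ 0
  · rw [if_pos hnd]
    by_cases h0 : nd = 0
    · subst h0
      rw [show (0 : Int) + 1 = 0 + 1 from rfl, PySem.List.pyRange_one_singleton]
      simp
    · rw [PySem.List.pyRange_one_eq_nil (by omega)]
      simp
  · rw [if_neg hnd]
    have hpre' : fs ≠ [] ∧ -(fs.length : Int) ≤ ri ∧ ri < (fs.length : Int) := by
      rcases hpre with h | h
      · omega
      · exact h
    obtain ⟨hne, hb1, hb2⟩ := hpre'
    have hn : 0 < fs.length := List.length_pos_iff.mpr hne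
    rw [PySem.List.pyRange_one_cons (by omega), List.foldl_cons]
    simp only [Option.bind_some, zero_add, reduceIte]
    rw [loopA ri fs.length hn hb1 hb2 (PySem.List.pyRange 1 (nd + 1)) fs rfl
      (fun d hd => by rw [PySem.List.mem_pyRange_one] at hd; omega)]
    rw [Option.getD_some, PySem.List.length_pyRange_one]
    have hr0 : 0 ≤ PySem.Int.mod ri (fs.length : Int) :=
      PySem.Int.mod_nonneg _ (by exact_mod_cast hn)
    have hrn : PySem.Int.mod ri (fs.length : Int) < (fs.length : Int) :=
      PySem.Int.mod_lt _ (by exact_mod_cast hn)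
    rw [loopB_view fs.length (PySem.Int.mod ri (fs.length : Int)).toNat hn (by omega)
      nd.toNat fs 0 rfl hn]
    simp only [List.drop_zero, List.take_zero, List.append_nil]
    rw [show ((((PySem.Int.mod ri (fs.length : Int)).toNat : Nat)) : Int)
          = PySem.Int.mod ri (fs.length : Int) from Int.toNat_of_nonneg hr0]
    congr 2
    omega
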